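-- pv_equiv track=rewrite | github.com/b-eyselein/it4all | app/initialData/programming/programming/collections/5/3/unit_test_sols/tuples_and_dicts_3.py | tuple_list_to_dict
-- ===== SOURCE A (Python) =====
-- from typing import Dict, List, Tuple
--
-- def tuple_list_to_dict(my_list: List[Tuple[str, int]]) -> Dict[str, int]:
--     result: Dict[str, int] = {}
--
--     for key, value in my_list:
--         if key not in result:
--             result[key] = value
--
--     if len(my_list) == 0:
--         result['error'] = 0
--
--     return result
-- ===== SOURCE B (Python) =====
-- def tuple_list_to_dict(my_list):
--     if not my_list:
--         return {'error': 0}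
--     # one unconditional pass over the reversed list: the first occurrence is written last and wins
--     first = {}
--     for key, value in reversed(my_list):
--         first[key] = value
--     # rebuild in first-occurrence order (dict comprehension keeps the first insertion position)
--     return {key: first[key] for key, _ in my_list}
-- ===== Notes on version B (the rewrite author's own statement) =====
-- stated objective: alternative
-- what changed: Replaces the membership-guarded forward insertion with two unconditional passes: assign over reversed(my_list) so the first occurrence wins, then rebuild in first-occurrence order with a dict comprehension; the empty case becomes an early return.
import Mathlib
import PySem

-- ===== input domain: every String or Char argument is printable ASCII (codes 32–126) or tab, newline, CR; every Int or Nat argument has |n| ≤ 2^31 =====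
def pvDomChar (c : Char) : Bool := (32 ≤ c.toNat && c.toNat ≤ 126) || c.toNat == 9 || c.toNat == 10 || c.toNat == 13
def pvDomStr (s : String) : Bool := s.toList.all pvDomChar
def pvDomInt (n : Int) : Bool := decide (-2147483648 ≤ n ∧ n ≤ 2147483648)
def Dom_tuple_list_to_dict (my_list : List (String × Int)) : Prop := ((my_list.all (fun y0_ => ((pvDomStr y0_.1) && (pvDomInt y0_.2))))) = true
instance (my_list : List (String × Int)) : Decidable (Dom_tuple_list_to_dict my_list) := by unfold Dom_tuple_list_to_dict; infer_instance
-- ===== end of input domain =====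

-- B replaces A's membership-guarded forward insertion by two unconditional passes
-- (assign over the reversed list so the first value wins, then rebuild in
-- first-occurrence order); same cost, alternative decomposition.

-- ===== PORT A =====
def tuple_list_to_dict (my_list : List (String × Int)) : List (String × Int) :=
  let result : PySem.Dict String Int :=
    my_list.foldl (fun d kv => if d.contains kv.1 then d else d.insert kv.1 kv.2) PySem.Dict.empty
  let result := if my_list.length = 0 then result.insert "error" 0 else result
  result.items

-- ===== PORT B =====
def tuple_list_to_dict_alt (my_list : List (String × Int)) : List (String × Int) :=
  if my_list = [] then [("error", 0)]  -- {'error': 0} as an association list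
  else
    -- for key, value in reversed(my_list): first[key] = value
    let first : PySem.Dict String Int :=
      my_list.reverse.foldl (fun d kv => d.insert kv.1 kv.2) PySem.Dict.empty
    -- {key: first[key] for key, _ in my_list}; every key of my_list is present in
    -- `first`, so Python's first[key] never raises and getD with default 0 is exact here
    (my_list.foldl (fun d kv => d.insert kv.1 (first.getD kv.1 0)) PySem.Dict.empty).items

-- ===== PRECONDITION & SPEC =====
def Spec_tuple_list_to_dict (my_list : List (String × Int)) (out : List (String × Int)) : Prop := out = tuple_list_to_dict_alt my_list
instance (my_list : List (String × Int)) (out : List (String × Int)) : Decidable (Spec_tuple_list_to_dict my_list out) := by unfold Spec_tuple_list_to_dict; infer_instance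

-- ===== CLAIM (what is proved, stated in full; the proofs are below) =====
def Claim_equal_tuple_list_to_dict : Prop := ∀ (my_list : List (String × Int)), Dom_tuple_list_to_dict my_list → Spec_tuple_list_to_dict my_list (tuple_list_to_dict my_list)

-- ===== LEMMAS AND PROOFS =====

/-- The pair list with every later duplicate key removed: the canonical value
both ports' folds are shown below to produce. -/
def firstWins : List (String × Int) → List (String × Int)
  | [] => []
  | (k, v) :: t => (k, v) :: firstWins (t.filter (fun p => p.1 != k))
termination_by l => l.length
decreasing_by
  simp only [List.length_unattach, List.length_cons]
  exact Nat.lt_succ_of_le (le_trans (List.length_filter_le _ _) (by simp))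

theorem portA_unfold (l : List (String × Int)) :
    tuple_list_to_dict l =
      (if l.length = 0
        then (l.foldl (fun d kv => if d.contains kv.1 then d else d.insert kv.1 kv.2) PySem.Dict.empty).insert "error" 0
        else l.foldl (fun d kv => if d.contains kv.1 then d else d.insert kv.1 kv.2) PySem.Dict.empty).items := rfl

theorem portB_unfold (l : List (String × Int)) :
    tuple_list_to_dict_alt l =
      if l = [] then [("error", 0)]
      else (l.foldl (fun d kv => d.insert kv.1
              ((l.reverse.foldl (fun d kv => d.insert kv.1 kv.2) PySem.Dict.empty).getD kv.1 0))
            PySem.Dict.empty).items := rfl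

theorem firstWins_nil : firstWins [] = [] := by rw [firstWins.eq_1]

theorem firstWins_cons (k : String) (v : Int) (t : List (String × Int)) :
    firstWins ((k, v) :: t) = (k, v) :: firstWins (t.filter (fun p => p.1 != k)) := by
  rw [firstWins.eq_2]

theorem items_empty : (PySem.Dict.empty : PySem.Dict String Int).items = [] := rfl

/-- A recursion principle matching firstWins' call structure. -/
theorem firstWins_rec (P : List (String × Int) → Prop)
    (h0 : P [])
    (h1 : ∀ k v t, P (t.filter (fun p => p.1 != k)) → P ((k, v) :: t)) :
    ∀ m, P m := by
  have key : ∀ n, ∀ m : List (String × Int), m.length ≤ n → P m := by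
    intro n
    induction n with
    | zero =>
      intro m hm
      cases m with
      | nil => exact h0
      | cons a t => simp at hm
    | succ n ihn =>
      intro m hm
      cases m with
      | nil => exact h0
      | cons a t =>
        obtain ⟨k, v⟩ := a
        refine h1 k v t (ihn _ (le_trans (List.length_filter_le _ _) ?_))
        simp only [List.length_cons] at hm
        omega
  intro m; exact key m.length m le_rfl

theorem mem_firstWins : ∀ (m : List (String × Int)) (p : String × Int), p ∈ firstWins m → p ∈ m := by
  refine firstWins_rec (fun m => ∀ p, p ∈ firstWins m → p ∈ m) ?_ ?_
  · intro p hp; rw [firstWins_nil] at hp; simp at hp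
  · intro k v t ih p hp
    rw [firstWins_cons] at hp
    rcases List.mem_cons.mp hp with rfl | h
    · simp
    · exact List.mem_cons_of_mem _ (List.mem_of_mem_filter (ih p h))

theorem find?_filter_eq {α : Type} (q r : α → Bool) (t : List α)
    (h : ∀ x, q x = true → r x = true) : (t.filter r).find? q = t.find? q := by
  induction t with
  | nil => rfl
  | cons a t ih =>
    rcases hq : q a with _ | _
    · rcases hr : r a with _ | _
      · simp [hr, hq, ih]
      · simp [hr, hq, ih]
    · have hr : r a = true := h a hq
      simp [hr, hq]

theorem find?_of_mem_firstWins : ∀ (m : List (String × Int)) (p : String × Int),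
    p ∈ firstWins m → m.find? (fun q => q.1 == p.1) = some p := by
  refine firstWins_rec (fun m => ∀ p, p ∈ firstWins m → m.find? (fun q => q.1 == p.1) = some p) ?_ ?_
  · intro p hp; rw [firstWins_nil] at hp; simp at hp
  · intro k v t ih p hp
    rw [firstWins_cons] at hp
    rcases List.mem_cons.mp hp with rfl | h
    · simp
    · have hpt : p ∈ t.filter (fun q => q.1 != k) := mem_firstWins _ p h
      have hpk : (p.1 != k) = true := (List.mem_filter.mp hpt).2
      have hpk' : p.1 ≠ k := by simpa using hpk
      have hrec := ih p h
      rw [find?_filter_eq (fun q => q.1 == p.1) (fun q => q.1 != k) t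
        (fun x hx => by
          have hx' : x.1 = p.1 := eq_of_beq hx
          show (x.1 != k) = true
          rw [hx']; simpa using hpk')] at hrec
      have hk : (k == p.1) = false := beq_eq_false_iff_ne.mpr (Ne.symm hpk')
      simpa [List.find?_cons, hk] using hrec

theorem get?_foldr_insert (l : List (String × Int)) (k : String) :
    (l.foldr (fun kv d => d.insert kv.1 kv.2) (PySem.Dict.empty : PySem.Dict String Int)).get? k
      = (l.find? (fun p => p.1 == k)).map Prod.snd := by
  induction l with
  | nil => simp [PySem.Dict.get?_empty]
  | cons kv t ih =>
    obtain ⟨k0, v0⟩ := kv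
    simp only [List.foldr_cons, List.find?_cons]
    rw [PySem.Dict.get?_insert]
    by_cases hk : k = k0
    · simp [hk]
    · have hk0 : (k0 == k) = false := beq_eq_false_iff_ne.mpr (Ne.symm hk)
      simp [hk, hk0, ih]

theorem filter_not_contains_insert (d : PySem.Dict String Int) (k : String) (v : Int)
    (t : List (String × Int)) :
    t.filter (fun p => !((d.insert k v).contains p.1))
      = (t.filter (fun p => !(d.contains p.1))).filter (fun p => p.1 != k) := by
  induction t with
  | nil => rfl
  | cons a t ih =>
    simp only [List.filter_cons]
    by_cases hak : a.1 = k <;> cases hda : d.contains a.1 <;>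
      simp [hak, hda, PySem.Dict.contains_insert, bne]

theorem foldA_items (l : List (String × Int)) : ∀ (d : PySem.Dict String Int),
    (l.foldl (fun d kv => if d.contains kv.1 then d else d.insert kv.1 kv.2) d).items
      = d.items ++ firstWins (l.filter (fun p => !(d.contains p.1))) := by
  induction l with
  | nil => intro d; simp [firstWins_nil]
  | cons kv t ih =>
    intro d
    obtain ⟨k, v⟩ := kv
    simp only [List.foldl_cons, List.filter_cons]
    by_cases hc : d.contains k = true
    · simp [hc, ih d]
    · have hc' : d.contains k = false := by simpa using hc
      have h1 := ih (d.insert k v)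
      rw [filter_not_contains_insert, PySem.Dict.items_insert_of_not_contains d v hc'] at h1
      simp [hc', h1, firstWins_cons]

theorem foldB_items (f : PySem.Dict String Int) (l : List (String × Int)) :
    ∀ (d : PySem.Dict String Int), (∀ p ∈ d.items, p.2 = f.getD p.1 0) →
    (l.foldl (fun d kv => d.insert kv.1 (f.getD kv.1 0)) d).items
      = d.items ++ (firstWins (l.filter (fun p => !(d.contains p.1)))).map (fun p => (p.1, f.getD p.1 0)) := by
  induction l with
  | nil => intro d _; simp [firstWins_nil]
  | cons kv t ih =>
    intro d hinv
    obtain ⟨k, v⟩ := kv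
    simp only [List.foldl_cons, List.filter_cons]
    by_cases hc : d.contains k = true
    · have hitems : (d.insert k (f.getD k 0)).items = d.items := by
        rw [PySem.Dict.items_insert_of_contains d (f.getD k 0) hc]
        have h : ∀ p ∈ d.items, (if p.1 == k then (k, f.getD k 0) else p) = p := by
          intro p hp
          obtain ⟨p1, p2⟩ := p
          by_cases hpk : p1 = k
          · have hv := hinv (p1, p2) hp
            simp only at hv
            simp [hpk, hv]
          · simp [hpk]
        exact (List.map_congr_left h).trans (by simp)
      have hfun : (t.filter (fun p => !((d.insert k (f.getD k 0)).contains p.1)))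
          = t.filter (fun p => !(d.contains p.1)) := by
        apply List.filter_congr
        intro x _
        by_cases hxk : x.1 = k
        · simp [hxk, hc]
        · simp [hxk, PySem.Dict.contains_insert]
      have h1 := ih (d.insert k (f.getD k 0)) (by rw [hitems]; exact hinv)
      rw [hfun, hitems] at h1
      simp [hc, h1]
    · have hc' : d.contains k = false := by simpa using hc
      have hinv2 : ∀ p ∈ (d.insert k (f.getD k 0)).items, p.2 = f.getD p.1 0 := by
        intro p hp
        rw [PySem.Dict.items_insert_of_not_contains d (f.getD k 0) hc'] at hp
        rcases List.mem_append.mp hp with hp | hp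
        · exact hinv p hp
        · simp only [List.mem_singleton] at hp
          simp [hp]
      have h1 := ih (d.insert k (f.getD k 0)) hinv2
      rw [filter_not_contains_insert, PySem.Dict.items_insert_of_not_contains d (f.getD k 0) hc'] at h1
      simp [hc', h1, firstWins_cons]

-- ===== VERDICT (by name: the statement is the Claim_ definition above) =====
theorem tuple_list_to_dict_spec : Claim_equal_tuple_list_to_dict := by
  intro l _
  show tuple_list_to_dict l = tuple_list_to_dict_alt l
  cases l with
  | nil => rfl
  | cons kv t =>
    rw [portA_unfold, portB_unfold]
    rw [if_neg (by simp : ¬((kv :: t).length = 0)), if_neg (by simp : ¬(kv :: t = []))]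
    rw [foldA_items]
    rw [foldB_items ((kv :: t).reverse.foldl (fun d kv => d.insert kv.1 kv.2) PySem.Dict.empty)
      (kv :: t) PySem.Dict.empty (by intro p hp; rw [items_empty] at hp; simp at hp)]
    simp only [items_empty, List.nil_append, PySem.Dict.contains_empty, Bool.not_false,
      List.filter_true]
    have hmem : ∀ p ∈ firstWins (kv :: t),
        ((p.1, ((kv :: t).reverse.foldl (fun d kv => d.insert kv.1 kv.2) PySem.Dict.empty).getD p.1 0) : String × Int) = p := by
      intro p hp
      have hfind := find?_of_mem_firstWins (kv :: t) p hp
      have hget := get?_foldr_insert (kv :: t) p.1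
      rw [hfind] at hget
      simp only [Option.map_some] at hget
      have hF : ((kv :: t).reverse.foldl (fun d kv => d.insert kv.1 kv.2) PySem.Dict.empty).get? p.1 = some p.2 := by
        rw [List.foldl_reverse]; exact hget
      rw [PySem.Dict.getD_eq_get?_getD, hF]
      simp
    exact ((List.map_congr_left hmem).trans (by simp)).symm
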